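-- pv_equiv track=rewrite | github.com/vgarcesp13/POO_Vs_Clases_TrabajoFinal | ProgramasCreados2/Ejercicio.py | Ejer24
-- ===== SOURCE A (Python) =====
-- def Ejer24(X):
--     L= X.split(',')
--     L1= []
--     L2= []
--     for i in L:
--         if int(i)%3 == 0:
--             L1+= [int(i)]
--     for I in L:
--         if int(I)%5 == 0:
--             L2+= [int(I)]
--     Mayor= None
--     for x in L2:
--         if Mayor == None:
--             Mayor= x
--         else:
--             if x > Mayor:
--                 Mayor= x
--     Menor= None
--     for y in L1:
--         if Menor == None:
--             Menor= y
--         else: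
--             if y < Menor:
--                 Menor= y
--     return("El mayor de los multiplos de 5 es: ({}).\nEl menor de los multiplos de 3 es: ({}).".format(Mayor, Menor))
-- ===== SOURCE B (Python) =====
-- def Ejer24(X):
--     mayor = None
--     menor = None
--     for tok in X.split(','):
--         n = int(tok)
--         if n % 5 == 0:
--             mayor = n if mayor is None else max(mayor, n)
--         if n % 3 == 0:
--             menor = n if menor is None else min(menor, n)
--     return "El mayor de los multiplos de 5 es: ({}).\nEl menor de los multiplos de 3 es: ({}).".format(mayor, menor)
-- ===== Notes on version B (the rewrite author's own statement) =====
-- stated objective: simpler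
-- what changed: B replaces A's four passes and two intermediate lists (and up to four int() parses per token) with one pass over the tokens maintaining two running accumulators, parsing each token exactly once.
import Mathlib
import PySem

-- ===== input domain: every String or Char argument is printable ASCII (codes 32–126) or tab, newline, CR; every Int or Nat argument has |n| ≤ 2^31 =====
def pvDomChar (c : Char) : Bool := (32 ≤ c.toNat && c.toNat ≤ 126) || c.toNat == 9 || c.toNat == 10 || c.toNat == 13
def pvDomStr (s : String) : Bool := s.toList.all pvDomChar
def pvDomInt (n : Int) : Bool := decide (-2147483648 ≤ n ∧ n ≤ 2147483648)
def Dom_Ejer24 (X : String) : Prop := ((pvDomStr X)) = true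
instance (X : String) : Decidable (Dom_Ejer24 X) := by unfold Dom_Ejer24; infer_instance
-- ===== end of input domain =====

-- B makes one pass over the tokens with two running accumulators instead of A's four passes
-- and two intermediate lists, parsing each token once. Return values are proved equal on Pre_.

-- ===== PORT A =====
-- shared by both ports: str(o) for an Optional[int]: "None" or str(n)
def fmtOpt (o : Option Int) : String :=
  match o with
  | none => "None"
  | some n => PySem.Int.toStr n

def Ejer24 (X : String) : String :=
  let L := (PySem.Str.split? X ",").getD []
  let L1 := L.foldl (fun acc i =>
      if PySem.Int.mod ((PySem.Int.ofStr? i).getD 0) 3 == 0 then acc ++ [(PySem.Int.ofStr? i).getD 0] else acc) []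
  let L2 := L.foldl (fun acc I =>
      if PySem.Int.mod ((PySem.Int.ofStr? I).getD 0) 5 == 0 then acc ++ [(PySem.Int.ofStr? I).getD 0] else acc) []
  let Mayor := L2.foldl (fun M x =>
      match M with
      | none => some x
      | some m => if x > m then some x else some m) (none : Option Int)
  let Menor := L1.foldl (fun M y =>
      match M with
      | none => some y
      | some m => if y < m then some y else some m) (none : Option Int)
  "El mayor de los multiplos de 5 es: (" ++ fmtOpt Mayor ++ ").\nEl menor de los multiplos de 3 es: (" ++ fmtOpt Menor ++ ")."

-- ===== PORT B =====
def Ejer24_alt (X : String) : String :=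
  let p := ((PySem.Str.split? X ",").getD []).foldl (fun (s : Option Int × Option Int) tok =>
      ( if PySem.Int.mod ((PySem.Int.ofStr? tok).getD 0) 5 == 0 then
          some (match s.1 with
                | none => (PySem.Int.ofStr? tok).getD 0
                | some m => max m ((PySem.Int.ofStr? tok).getD 0))
        else s.1,
        if PySem.Int.mod ((PySem.Int.ofStr? tok).getD 0) 3 == 0 then
          some (match s.2 with
                | none => (PySem.Int.ofStr? tok).getD 0
                | some m => min m ((PySem.Int.ofStr? tok).getD 0))
        else s.2 )) ((none : Option Int), (none : Option Int))
  "El mayor de los multiplos de 5 es: (" ++ fmtOpt p.1 ++ ").\nEl menor de los multiplos de 3 es: (" ++ fmtOpt p.2 ++ ")."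

-- ===== PRECONDITION & SPEC =====
-- Pre_: every comma-separated token parses as a Python int; on any other token A raises ValueError.
def Pre_Ejer24 (X : String) : Prop :=
  ∀ t ∈ (PySem.Str.split? X ",").getD [], (PySem.Int.ofStr? t).isSome = true
instance (X : String) : Decidable (Pre_Ejer24 X) := by unfold Pre_Ejer24; infer_instance
def pvWitness_Ejer24 : String := "15,9,10"

def Spec_Ejer24 (X : String) (out : String) : Prop := out = Ejer24_alt X
instance (X : String) (out : String) : Decidable (Spec_Ejer24 X out) := by unfold Spec_Ejer24; infer_instance

-- ===== CLAIM (what is proved, stated in full; the proofs are below) =====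
def Claim_equal_Ejer24 : Prop := ∀ (X : String), Dom_Ejer24 X → Pre_Ejer24 X → Spec_Ejer24 X (Ejer24 X)

-- ===== LEMMAS AND PROOFS =====

-- a fold whose pair state updates componentwise is the pair of the component folds
lemma foldl_pair {α : Type} (g h : Option Int → α → Option Int) (l : List α)
    (a b : Option Int) :
    l.foldl (fun s x => (g s.1 x, h s.2 x)) (a, b) = (l.foldl g a, l.foldl h b) := by
  induction l generalizing a b with
  | nil => rfl
  | cons x xs ih => simp [List.foldl, ih]

-- A's "if x > m" max step equals B's `max`
lemma stepMax_eq (M : Option Int) (x : Int) :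
    (match M with
     | none => some x
     | some m => if x > m then some x else some m) =
    some (match M with | none => x | some m => max m x) := by
  cases M with
  | none => rfl
  | some m =>
    simp only [max_def]
    split_ifs <;> simp_all <;> omega

-- A's "if y < m" min step equals B's `min`
lemma stepMin_eq (M : Option Int) (y : Int) :
    (match M with
     | none => some y
     | some m => if y < m then some y else some m) =
    some (match M with | none => y | some m => min m y) := by
  cases M with
  | none => rfl
  | some m =>
    simp only [min_def]
    split_ifs <;> simp_all
    omega

-- ===== VERDICT (by name: the statement is the Claim_ definition above) =====
theorem Ejer24_spec : Claim_equal_Ejer24 := by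
  intro X _ _
  unfold Spec_Ejer24 Ejer24 Ejer24_alt
  dsimp only
  rw [foldl_pair
        (fun M tok =>
          if PySem.Int.mod ((PySem.Int.ofStr? tok).getD 0) 5 == 0 then
            some (match M with
                  | none => (PySem.Int.ofStr? tok).getD 0
                  | some m => max m ((PySem.Int.ofStr? tok).getD 0))
          else M)
        (fun M tok =>
          if PySem.Int.mod ((PySem.Int.ofStr? tok).getD 0) 3 == 0 then
            some (match M with
                  | none => (PySem.Int.ofStr? tok).getD 0
                  | some m => min m ((PySem.Int.ofStr? tok).getD 0))
          else M)]
  rw [PySem.List.foldl_append_if, PySem.List.foldl_append_if]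
  simp only [List.nil_append]
  rw [PySem.List.foldl_if_eq_foldl_filter, PySem.List.foldl_if_eq_foldl_filter,
      List.foldl_map, List.foldl_map]
  have hf5 : (fun (x : Option Int) (y : String) =>
      match x with
      | none => some ((PySem.Int.ofStr? y).getD 0)
      | some m => if (PySem.Int.ofStr? y).getD 0 > m then some ((PySem.Int.ofStr? y).getD 0) else some m)
      = (fun (M : Option Int) (tok : String) =>
      some (match M with
            | none => (PySem.Int.ofStr? tok).getD 0
            | some m => max m ((PySem.Int.ofStr? tok).getD 0))) :=
    funext fun M => funext fun t => stepMax_eq M _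
  have hf3 : (fun (x : Option Int) (y : String) =>
      match x with
      | none => some ((PySem.Int.ofStr? y).getD 0)
      | some m => if (PySem.Int.ofStr? y).getD 0 < m then some ((PySem.Int.ofStr? y).getD 0) else some m)
      = (fun (M : Option Int) (tok : String) =>
      some (match M with
            | none => (PySem.Int.ofStr? tok).getD 0
            | some m => min m ((PySem.Int.ofStr? tok).getD 0))) :=
    funext fun M => funext fun t => stepMin_eq M _
  rw [hf5, hf3]
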